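-- pv_equiv track=rewrite | github.com/jbischof/algo_practice | epi2/hash.py | find_closest_repeat
-- ===== SOURCE A (Python) =====
-- def find_closest_repeat(a):
--   """Return closest repeated word in array of strings.
--
--   Time: O(n)
--   Space: O(m), where m is number of unique strings.
--   """
--
--   worst_repeat, worst_dist = None, len(a) + 1
--   wdict = {}
--   for i, s in enumerate(a):
--     if s not in wdict:
--       wdict[s] = i
--     else:
--       dist = i - wdict[s]
--       wdict[s] = i
--       if dist < worst_dist:
--         worst_repeat = s
--         worst_dist = dist
--   return worst_repeat
-- ===== SOURCE B (Python) =====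
-- def find_closest_repeat(a):
--   """Return closest repeated word by scanning backwards from each position
--   for the previous occurrence of the same word (no hash map)."""
--   best_word, best_dist = None, None
--   for j in range(len(a)):
--     for p in range(j - 1, -1, -1):
--       if a[p] == a[j]:
--         d = j - p
--         if best_dist is None or d < best_dist:
--           best_word, best_dist = a[j], d
--         break
--   return best_word
-- ===== Notes on version B (the rewrite author's own statement) =====
-- stated objective: alternative
-- what changed: Replaces the hash map of last-seen indices by a nested backward scan: for each position the previous occurrence of the same word is found by scanning left until the first match, so no dictionary is maintained at all.
import Mathlib
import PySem

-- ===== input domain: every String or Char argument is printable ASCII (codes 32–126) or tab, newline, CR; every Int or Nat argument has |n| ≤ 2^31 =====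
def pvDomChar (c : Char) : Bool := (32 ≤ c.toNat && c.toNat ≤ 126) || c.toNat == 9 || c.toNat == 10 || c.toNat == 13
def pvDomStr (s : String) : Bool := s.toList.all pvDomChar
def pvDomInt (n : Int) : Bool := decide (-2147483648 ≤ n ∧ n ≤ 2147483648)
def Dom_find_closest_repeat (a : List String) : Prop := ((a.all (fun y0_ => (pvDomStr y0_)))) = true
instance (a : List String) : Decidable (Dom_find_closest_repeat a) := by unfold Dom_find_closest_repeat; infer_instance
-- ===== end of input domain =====

-- B replaces A's hash map of last-seen indices by a nested backward scan for the previous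
-- occurrence of each word (alternative decomposition, not claimed faster).

-- ===== PORT A =====
def find_closest_repeat (a : List String) : Option String :=
  ((PySem.List.enumerate a 0).foldl
      (fun (st : Option String × Int × PySem.Dict String Int) is =>
        let i := is.1
        let s := is.2
        if st.2.2.contains s = false then
          (st.1, st.2.1, st.2.2.insert s i)
        else
          -- 'wdict[s]': the key is present in this branch, so getD's default is never used
          let dist := i - st.2.2.getD s 0
          if dist < st.2.1 then (some s, dist, st.2.2.insert s i)
          else (st.1, st.2.1, st.2.2.insert s i))
      (none, ((a.length : Int) + 1, PySem.Dict.empty))).1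

-- ===== PORT B =====
-- inner loop 'for p in range(j-1, -1, -1): if a[p] == a[j]: … break' as a countdown
-- recursion; all indices used are in range, so List.getD's default is never used
def prevScan (a : List String) (s : String) : Nat → Option Nat
  | 0 => none
  | p + 1 => if a.getD p "" == s then some p else prevScan a s p

def find_closest_repeat_alt (a : List String) : Option String :=
  ((List.range a.length).foldl
      (fun (st : Option String × Option Int) j =>
        match prevScan a (a.getD j "") j with
        | none => st
        | some p =>
          let d : Int := (j : Int) - (p : Int)
          match st.2 with
          | none => (some (a.getD j ""), some d)
          | some bd => if d < bd then (some (a.getD j ""), some d) else st)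
      (none, none)).1

-- ===== PRECONDITION & SPEC =====
def Spec_find_closest_repeat (a : List String) (out : Option String) : Prop := out = find_closest_repeat_alt a
instance (a : List String) (out : Option String) : Decidable (Spec_find_closest_repeat a out) := by unfold Spec_find_closest_repeat; infer_instance

-- ===== CLAIM (what is proved, stated in full; the proofs are below) =====
def Claim_equal_find_closest_repeat : Prop := ∀ (a : List String), Dom_find_closest_repeat a → Spec_find_closest_repeat a (find_closest_repeat a)

-- ===== LEMMAS AND PROOFS =====

-- A's state after processing the first n positions
def stA (a : List String) (n : Nat) : Option String × Int × PySem.Dict String Int :=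
  (PySem.List.enumerate (a.take n) 0).foldl
      (fun (st : Option String × Int × PySem.Dict String Int) is =>
        let i := is.1
        let s := is.2
        if st.2.2.contains s = false then
          (st.1, st.2.1, st.2.2.insert s i)
        else
          let dist := i - st.2.2.getD s 0
          if dist < st.2.1 then (some s, dist, st.2.2.insert s i)
          else (st.1, st.2.1, st.2.2.insert s i))
      (none, ((a.length : Int) + 1, PySem.Dict.empty))

-- B's state after processing the first n positions
def stB (a : List String) (n : Nat) : Option String × Option Int :=
  (List.range n).foldl
      (fun (st : Option String × Option Int) j =>
        match prevScan a (a.getD j "") j with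
        | none => st
        | some p =>
          let d : Int := (j : Int) - (p : Int)
          match st.2 with
          | none => (some (a.getD j ""), some d)
          | some bd => if d < bd then (some (a.getD j ""), some d) else st)
      (none, none)

theorem prevScan_lt (a : List String) (s : String) (n p : Nat)
    (h : prevScan a s n = some p) : p < n := by
  induction n with
  | zero => simp [prevScan] at h
  | succ m ih =>
    simp only [prevScan] at h
    split at h
    · injection h with h; omega
    · exact Nat.lt_succ_of_lt (ih h)

theorem stA_succ (a : List String) (n : Nat) (hn : n < a.length) :
    stA a (n + 1) =
      (if (stA a n).2.2.contains (a.getD n "") = false then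
        ((stA a n).1, (stA a n).2.1, (stA a n).2.2.insert (a.getD n "") (n : Int))
      else
        if (n : Int) - (stA a n).2.2.getD (a.getD n "") 0 < (stA a n).2.1 then
          (some (a.getD n ""), (n : Int) - (stA a n).2.2.getD (a.getD n "") 0,
            (stA a n).2.2.insert (a.getD n "") (n : Int))
        else ((stA a n).1, (stA a n).2.1, (stA a n).2.2.insert (a.getD n "") (n : Int))) := by
  have ht : a.take (n + 1) = a.take n ++ [a.getD n ""] := by
    rw [List.take_add_one]
    simp [List.getElem?_eq_getElem hn, List.getD_eq_getElem?_getD]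
  have hl : (a.take n).length = n := List.length_take_of_le (Nat.le_of_lt hn)
  rw [stA, ht, PySem.List.enumerate_append, List.foldl_append, hl]
  rw [show PySem.List.enumerate [a.getD n ""] ((0 : Int) + (n : Nat)) = [((n : Int), a.getD n "")] by
    simp [PySem.List.enumerate_cons, PySem.List.enumerate_nil]]
  rfl

theorem stB_succ (a : List String) (n : Nat) :
    stB a (n + 1) =
      (match prevScan a (a.getD n "") n with
        | none => stB a n
        | some p =>
          match (stB a n).2 with
          | none => (some (a.getD n ""), some ((n : Int) - (p : Int)))
          | some bd => if (n : Int) - (p : Int) < bd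
              then (some (a.getD n ""), some ((n : Int) - (p : Int))) else stB a n) := by
  rw [stB, List.range_succ, List.foldl_append]
  rfl

theorem insert_prevScan (a : List String) (m : Nat) (d : PySem.Dict String Int)
    (ihd : ∀ s : String, d.get? s = (prevScan a s m).map (fun p => (p : Int))) :
    ∀ s : String, (d.insert (a.getD m "") (m : Int)).get? s
      = (prevScan a s (m + 1)).map (fun q => (q : Int)) := by
  intro s
  rw [PySem.Dict.get?_insert]
  simp only [prevScan]
  by_cases hne : s = a.getD m ""
  · have hbe : (a.getD m "" == s) = true := beq_iff_eq.mpr hne.symm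
    rw [if_pos hne, if_pos hbe]
    rfl
  · have hbe : ¬ ((a.getD m "" == s) = true) := by
      intro h; exact hne (beq_iff_eq.mp h).symm
    rw [if_neg hne, if_neg hbe, ihd s]

theorem invariant (a : List String) (n : Nat) (hn : n ≤ a.length) :
    (∀ s : String, (stA a n).2.2.get? s = (prevScan a s n).map (fun p => (p : Int)))
    ∧ (stA a n).1 = (stB a n).1
    ∧ (match (stB a n).2 with
       | none => (stA a n).2.1 = (a.length : Int) + 1 ∧ (stB a n).1 = none
       | some d => (stA a n).2.1 = d) := by
  induction n with
  | zero =>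
    refine ⟨fun s => ?_, rfl, ?_⟩
    · simp [stA, prevScan, PySem.Dict.get?_empty]
    · simp [stA, stB]
  | succ m ih =>
    have hm : m < a.length := Nat.lt_of_succ_le hn
    obtain ⟨ihd, ihr, ihw⟩ := ih (Nat.le_of_lt hm)
    have hnew := insert_prevScan a m (stA a m).2.2 ihd
    cases hprev : prevScan a (a.getD m "") m with
    | none =>
      have hget : (stA a m).2.2.get? (a.getD m "") = none := by rw [ihd, hprev]; rfl
      have hcon : (stA a m).2.2.contains (a.getD m "") = false := by
        rw [PySem.Dict.contains_eq_isSome_get?, hget]; rfl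
      have hA1 : stA a (m + 1)
          = ((stA a m).1, (stA a m).2.1, (stA a m).2.2.insert (a.getD m "") (m : Int)) := by
        rw [stA_succ a m hm, hcon, if_pos rfl]
      have hB1 : stB a (m + 1) = stB a m := by
        rw [stB_succ a m, hprev]
      rw [hA1, hB1]
      exact ⟨hnew, ihr, ihw⟩
    | some p =>
      have hp : p < m := prevScan_lt a (a.getD m "") m p hprev
      have hget : (stA a m).2.2.get? (a.getD m "") = some (p : Int) := by
        rw [ihd, hprev]; rfl
      have hcon : (stA a m).2.2.contains (a.getD m "") = true := by
        rw [PySem.Dict.contains_eq_isSome_get?, hget]; rfl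
      have hgetD : (stA a m).2.2.getD (a.getD m "") 0 = (p : Int) := by
        rw [PySem.Dict.getD_eq_get?_getD, hget]; rfl
      have hconf : ¬ ((stA a m).2.2.contains (a.getD m "") = false) := by
        rw [hcon]; simp
      cases hb : (stB a m).2 with
      | none =>
        rw [hb] at ihw
        obtain ⟨hw, hbn⟩ := ihw
        have hlt : (m : Int) - (p : Int) < (stA a m).2.1 := by rw [hw]; omega
        have hA1 : stA a (m + 1)
            = (some (a.getD m ""), (m : Int) - (p : Int),
               (stA a m).2.2.insert (a.getD m "") (m : Int)) := by
          rw [stA_succ a m hm, if_neg hconf, hgetD, if_pos hlt]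
        have hB1 : stB a (m + 1) = (some (a.getD m ""), some ((m : Int) - (p : Int))) := by
          rw [stB_succ a m, hprev, hb]
        rw [hA1, hB1]
        exact ⟨hnew, rfl, rfl⟩
      | some bd =>
        rw [hb] at ihw
        by_cases hlt : (m : Int) - (p : Int) < bd
        · have hA1 : stA a (m + 1)
              = (some (a.getD m ""), (m : Int) - (p : Int),
                 (stA a m).2.2.insert (a.getD m "") (m : Int)) := by
            rw [stA_succ a m hm, if_neg hconf, hgetD, ihw, if_pos hlt]
          have hB1 : stB a (m + 1) = (some (a.getD m ""), some ((m : Int) - (p : Int))) := by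
            rw [stB_succ a m, hprev, hb]; exact if_pos hlt
          rw [hA1, hB1]
          exact ⟨hnew, rfl, rfl⟩
        · have hA1 : stA a (m + 1)
              = ((stA a m).1, (stA a m).2.1,
                 (stA a m).2.2.insert (a.getD m "") (m : Int)) := by
            rw [stA_succ a m hm, if_neg hconf, hgetD, ihw, if_neg hlt]
          have hB1 : stB a (m + 1) = stB a m := by
            rw [stB_succ a m, hprev, hb]; exact if_neg hlt
          rw [hA1, hB1, hb]
          exact ⟨hnew, ihr, ihw⟩

-- ===== VERDICT (by name: the statement is the Claim_ definition above) =====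
theorem find_closest_repeat_spec : Claim_equal_find_closest_repeat := by
  intro a _
  show find_closest_repeat a = find_closest_repeat_alt a
  have hA : find_closest_repeat a = (stA a a.length).1 := by
    rw [find_closest_repeat, stA, List.take_length]
  have hB : find_closest_repeat_alt a = (stB a a.length).1 := rfl
  rw [hA, hB]
  exact (invariant a a.length (le_refl _)).2.1
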